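-- pv_equiv track=rewrite | github.com/SpM-lab/libsparseir | python/tests/c_api/integration_tests.py | _get_dims
-- ===== SOURCE A (Python) =====
-- def _get_dims(target_dim_size, extra_dims, target_dim):
--     """Helper function to arrange dimensions with target dimension at specified position."""
--     ndim = len(extra_dims) + 1
--     dims = [0] * ndim
--     dims[target_dim] = target_dim_size
--
--     pos = 0
--     for i in range(ndim):
--         if i == target_dim:
--             continue
--         dims[i] = extra_dims[pos]
--         pos += 1
--
--     return dims
-- ===== SOURCE B (Python) =====
-- def _get_dims(target_dim_size, extra_dims, target_dim):
--     """Helper function to arrange dimensions with target dimension at specified position."""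
--     ed = list(extra_dims)
--     return ed[:target_dim] + [target_dim_size] + ed[target_dim:]
-- ===== Notes on version B (the rewrite author's own statement) =====
-- stated objective: simpler
-- what changed: Replaced the zero-filled array, positional skip-loop and pos counter with a slice-and-concatenate construction: prefix of extra_dims, the target size, then the suffix; no mutation and no index bookkeeping.
import Mathlib
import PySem

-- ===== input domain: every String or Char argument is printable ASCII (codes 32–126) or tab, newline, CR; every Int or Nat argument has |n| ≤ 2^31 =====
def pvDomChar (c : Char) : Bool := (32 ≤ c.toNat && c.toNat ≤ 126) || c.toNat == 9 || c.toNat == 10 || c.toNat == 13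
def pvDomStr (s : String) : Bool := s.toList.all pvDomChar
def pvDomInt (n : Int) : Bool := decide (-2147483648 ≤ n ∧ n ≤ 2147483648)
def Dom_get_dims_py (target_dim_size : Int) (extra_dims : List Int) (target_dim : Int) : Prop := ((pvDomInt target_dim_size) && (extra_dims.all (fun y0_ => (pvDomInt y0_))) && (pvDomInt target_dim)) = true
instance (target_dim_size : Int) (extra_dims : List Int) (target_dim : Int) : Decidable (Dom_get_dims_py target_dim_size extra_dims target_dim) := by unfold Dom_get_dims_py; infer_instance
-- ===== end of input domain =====

-- B replaces A's zero-filled array, skip-loop and pos counter by slice-and-concatenate (simpler decomposition, same cost).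


-- ===== PORT A =====
def get_dims_py (target_dim_size : Int) (extra_dims : List Int) (target_dim : Int) : List Int :=
  let ndim := extra_dims.length + 1
  let dims0 := List.replicate ndim (0 : Int)
  let dims1 := PySem.List.pySetD dims0 target_dim target_dim_size
  -- for i in range(ndim): if i == target_dim: continue; dims[i] = extra_dims[pos]; pos += 1
  let st := (List.range ndim).foldl
    (fun (st : List Int × Int) (i : Nat) =>
      if (i : Int) == target_dim then st
      else (PySem.List.pySetD st.1 (i : Int) (PySem.List.pyGetD extra_dims st.2 0), st.2 + 1))
    (dims1, 0)
  st.1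

-- ===== PORT B =====
def get_dims_py_alt (target_dim_size : Int) (extra_dims : List Int) (target_dim : Int) : List Int :=
  let ed := extra_dims
  PySem.List.slice ed none (some target_dim) ++ [target_dim_size] ++ PySem.List.slice ed (some target_dim) none

-- ===== PRECONDITION & SPEC =====
-- A raises IndexError for target_dim outside [0, len(extra_dims)+1): negative target_dim makes
-- the fill loop read extra_dims[len(extra_dims)], out-of-range target_dim fails at dims[target_dim].
def Pre_get_dims_py (target_dim_size : Int) (extra_dims : List Int) (target_dim : Int) : Prop :=
  0 ≤ target_dim ∧ target_dim < (extra_dims.length : Int) + 1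
instance (target_dim_size : Int) (extra_dims : List Int) (target_dim : Int) : Decidable (Pre_get_dims_py target_dim_size extra_dims target_dim) := by unfold Pre_get_dims_py; infer_instance
def pvWitness_get_dims_py : Int × List Int × Int := (9, [1, 2, 3], 2)

def Spec_get_dims_py (target_dim_size : Int) (extra_dims : List Int) (target_dim : Int) (out : List Int) : Prop := out = get_dims_py_alt target_dim_size extra_dims target_dim
instance (target_dim_size : Int) (extra_dims : List Int) (target_dim : Int) (out : List Int) : Decidable (Spec_get_dims_py target_dim_size extra_dims target_dim out) := by unfold Spec_get_dims_py; infer_instance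

-- ===== CLAIM (what is proved, stated in full; the proofs are below) =====
def Claim_equal_get_dims_py : Prop := ∀ (target_dim_size : Int) (extra_dims : List Int) (target_dim : Int), Dom_get_dims_py target_dim_size extra_dims target_dim → Pre_get_dims_py target_dim_size extra_dims target_dim → Spec_get_dims_py target_dim_size extra_dims target_dim (get_dims_py target_dim_size extra_dims target_dim)

-- ===== LEMMAS AND PROOFS =====

-- the intended result: extra_dims with `s` inserted at position t
def pvIns (extra : List Int) (s : Int) (t : Nat) : List Int :=
  extra.take t ++ s :: extra.drop t

lemma pvIns_length (extra : List Int) (s : Int) (t : Nat) (ht : t ≤ extra.length) :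
    (pvIns extra s t).length = extra.length + 1 := by
  simp [pvIns]

lemma pvIns_get_t (extra : List Int) (s : Int) (t : Nat) (ht : t ≤ extra.length) :
    (pvIns extra s t)[t]? = some s := by
  rw [pvIns, List.getElem?_append_right (by simp [Nat.min_eq_left ht])]
  simp [Nat.min_eq_left ht]

lemma pvIns_get_lt (extra : List Int) (s : Int) (t a : Nat) (ht : t ≤ extra.length)
    (ha : a < t) : (pvIns extra s t)[a]? = extra[a]? := by
  have h : a < (extra.take t).length := by simp; omega
  rw [pvIns, List.getElem?_append_left h, List.getElem?_take_of_lt ha]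

lemma pvIns_get_gt (extra : List Int) (s : Int) (t a : Nat) (ht : t ≤ extra.length)
    (ha : t < a) (ha2 : a ≤ extra.length) : (pvIns extra s t)[a]? = extra[a-1]? := by
  rw [pvIns, List.getElem?_append_right (by simp; omega)]
  have h1 : a - (extra.take t).length = (a - t - 1) + 1 := by simp [Nat.min_eq_left ht]; omega
  rw [h1]
  simp [List.getElem?_drop]
  congr 1
  omega

-- loop invariant for A's fill loop
lemma pv_loop_inv (extra : List Int) (s : Int) (t : Nat) (ht : t ≤ extra.length) :
    ∀ (k a : Nat) (dims : List Int) (pos : Int),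
      a + k = extra.length + 1 →
      dims.length = extra.length + 1 →
      dims.take a = (pvIns extra s t).take a →
      (a ≤ t → dims[t]? = some s) →
      pos = (if t < a then (a : Int) - 1 else (a : Int)) →
      ((List.range' a k).foldl
        (fun (st : List Int × Int) (i : Nat) =>
          if (i : Int) == (t : Int) then st
          else (PySem.List.pySetD st.1 (i : Int) (PySem.List.pyGetD extra st.2 0), st.2 + 1))
        (dims, pos)).1 = pvIns extra s t := by
  intro k
  induction k with
  | zero =>
    intro a dims pos hk hlen htake _ _
    have ha : a = extra.length + 1 := by omega
    have h1 : dims.take a = dims := List.take_of_length_le (by omega)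
    have h2 : (pvIns extra s t).take a = pvIns extra s t :=
      List.take_of_length_le (by rw [pvIns_length extra s t ht]; omega)
    simpa [h1, h2] using htake
  | succ k ih =>
    intro a dims pos hk hlen htake hgt hpos
    rw [List.range'_succ, List.foldl_cons]
    by_cases hat : a = t
    · -- skipped iteration
      have hbeq : ((a : Int) == (t : Int)) = true := by simp [hat]
      rw [if_pos hbeq]
      apply ih (a + 1) dims pos (by omega) hlen
      · -- take (a+1)
        rw [List.take_succ, List.take_succ, htake, hat,
            hgt (le_of_eq hat), pvIns_get_t extra s t ht]
      · intro h; omega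
      · subst hat; simp at hpos ⊢; omega
    · -- filling iteration
      have hbeq : ((a : Int) == (t : Int)) = false := by
        simp [Int.natCast_inj]; omega
      rw [if_neg (by simp [hbeq])]
      have halen : a ≤ extra.length := by omega
      -- the value written is (pvIns extra s t)[a]
      have hval : PySem.List.pyGetD extra pos 0 = (pvIns extra s t)[a]?.getD 0 := by
        by_cases hlt : a < t
        · rw [if_neg (by omega)] at hpos
          subst hpos
          rw [PySem.List.pyGetD_natCast, pvIns_get_lt extra s t a ht hlt]
          simp [List.getD]
        · have hgt' : t < a := by omega
          rw [if_pos hgt'] at hpos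
          have hpos' : pos = ((a - 1 : Nat) : Int) := by subst hpos; push_cast; omega
          subst hpos'
          rw [PySem.List.pyGetD_natCast, pvIns_get_gt extra s t a ht hgt' halen]
          simp [List.getD]
      have hset : PySem.List.pySetD dims (a : Int) (PySem.List.pyGetD extra pos 0)
          = dims.set a ((pvIns extra s t)[a]?.getD 0) := by
        rw [hval, PySem.List.pySetD_natCast]
      rw [hset]
      apply ih (a + 1) _ _ (by omega) (by simpa using hlen)
      · -- take (a+1) of the updated dims
        have hadlt : a < dims.length := by omega
        have haplt : a < (pvIns extra s t).length := by rw [pvIns_length extra s t ht]; omega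
        have h1 : (dims.set a ((pvIns extra s t)[a]?.getD 0)).take a = dims.take a := by
          apply List.ext_getElem? ; intro n
          by_cases hn : n < a
          · rw [List.getElem?_take_of_lt hn, List.getElem?_take_of_lt hn,
                List.getElem?_set_ne (by omega)]
          · rw [List.getElem?_eq_none (by simp; omega), List.getElem?_eq_none (by simp; omega)]
        rw [List.take_add_one, List.take_add_one, h1, htake,
            List.getElem?_set_self (by omega), List.getElem?_eq_getElem haplt]
        simp
      · intro h
        rw [List.getElem?_set_ne (by omega)]
        exact hgt (by omega)
      · by_cases hlt : a < t
        · rw [if_neg (by omega)] at hpos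
          rw [if_neg (by omega)]
          subst hpos; push_cast; ring
        · have hgt' : t < a := by omega
          rw [if_pos hgt'] at hpos
          rw [if_pos (by omega)]
          subst hpos; push_cast; ring

theorem get_dims_py_spec : Claim_equal_get_dims_py := by
  intro s extra td _ hpre
  obtain ⟨h0, h1⟩ := hpre
  unfold Spec_get_dims_py get_dims_py get_dims_py_alt
  obtain ⟨t, rfl⟩ : ∃ t : Nat, td = (t : Int) := ⟨td.toNat, by omega⟩
  have ht : t ≤ extra.length := by omega
  simp only [PySem.List.slice_to_natCast, PySem.List.slice_from_natCast]
  have hrhs : extra.take t ++ [s] ++ extra.drop t = pvIns extra s t := by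
    simp [pvIns]
  rw [hrhs]
  have hrepl : PySem.List.pySetD (List.replicate (extra.length + 1) (0:Int)) (t : Int) s
      = (List.replicate (extra.length + 1) (0:Int)).set t s := PySem.List.pySetD_natCast _ _ _
  simp only [hrepl, List.range_eq_range']
  exact pv_loop_inv extra s t ht (extra.length + 1) 0
    ((List.replicate (extra.length + 1) (0:Int)).set t s) 0
    (by omega) (by simp)
    (by simp)
    (fun _ => by rw [List.getElem?_set_self (by simp only [List.length_replicate]; omega)])
    (by simp)
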